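-- pv_equiv track=rewrite | github.com/pritamleo841/exam-analyzer | categorizers/rule_categorizer.py | _match_sub_topic
-- ===== SOURCE A (Python) =====
-- def _match_sub_topic(text: str, sub_topics: list[str]) -> str:
--     """Try to match a specific sub-topic from the list."""
--     for st in sub_topics:
--         # Check if sub-topic name keywords appear in the question
--         st_words = [w for w in st.lower().split() if len(w) > 2]
--         if st_words and all(w in text for w in st_words):
--             return st
--
--     # Partial match — any key word from sub-topic
--     for st in sub_topics:
--         st_words = [w for w in st.lower().split() if len(w) > 3]
--         if any(w in text for w in st_words):
--             return st
--
--     return sub_topics[0] if sub_topics else ""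
-- ===== SOURCE B (Python) =====
-- def _match_sub_topic(text: str, sub_topics: list[str]) -> str:
--     """Single pass: return first exact match immediately; remember the first
--     partial candidate and fall back to it, else the first sub-topic, else ""."""
--     first_partial = None
--     for st in sub_topics:
--         words = st.lower().split()
--         exact = [w for w in words if len(w) > 2]
--         if exact and all(w in text for w in exact):
--             return st
--         if first_partial is None and any(w in text for w in words if len(w) > 3):
--             first_partial = st
--     if first_partial is not None:
--         return first_partial
--     return sub_topics[0] if sub_topics else ""
-- ===== Notes on version B (the rewrite author's own statement) =====
-- stated objective: alternative
-- what changed: Collapses A's two sequential priority scans (exact, then partial) into one pass over sub_topics that returns an exact match immediately and keeps a first-partial-candidate accumulator, splitting each sub-topic once instead of twice.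
import Mathlib
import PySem

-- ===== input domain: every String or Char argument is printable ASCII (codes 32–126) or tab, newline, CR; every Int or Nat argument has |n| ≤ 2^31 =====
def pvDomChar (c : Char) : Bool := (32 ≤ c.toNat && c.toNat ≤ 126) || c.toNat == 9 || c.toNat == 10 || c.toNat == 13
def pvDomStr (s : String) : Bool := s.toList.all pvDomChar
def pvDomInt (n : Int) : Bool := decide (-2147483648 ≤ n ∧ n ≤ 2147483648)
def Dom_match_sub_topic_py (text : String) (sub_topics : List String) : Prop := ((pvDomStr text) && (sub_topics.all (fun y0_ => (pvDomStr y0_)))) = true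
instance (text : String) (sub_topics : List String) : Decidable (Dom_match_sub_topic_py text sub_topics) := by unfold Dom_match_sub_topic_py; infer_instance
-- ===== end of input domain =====

-- B merges A's two sequential priority scans into one pass with a first-partial-candidate accumulator (return value only; no side effects).


-- ===== PORT A =====
-- st_words = [w for w in st.lower().split() if len(w) > 2]; 'st_words and all(w in text …)'
def pvAExactCond (text st : String) : Bool :=
  let stWords := (PySem.Str.split₀ (PySem.Str.lower st)).filter (fun w => 2 < PySem.Str.len w)
  !stWords.isEmpty && stWords.all (fun w => PySem.Str.isIn w text)

-- 'any(w in text for w in st_words)' with st_words = words of len > 3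
def pvAPartialCond (text st : String) : Bool :=
  ((PySem.Str.split₀ (PySem.Str.lower st)).filter (fun w => 3 < PySem.Str.len w)).any
    (fun w => PySem.Str.isIn w text)

-- first loop of A
def pvAExactLoop (text : String) : List String → Option String
  | [] => none
  | st :: rest => if pvAExactCond text st then some st else pvAExactLoop text rest

-- second loop of A
def pvAPartialLoop (text : String) : List String → Option String
  | [] => none
  | st :: rest => if pvAPartialCond text st then some st else pvAPartialLoop text rest

def match_sub_topic_py (text : String) (sub_topics : List String) : String :=
  match pvAExactLoop text sub_topics with
  | some st => st
  | none =>
    match pvAPartialLoop text sub_topics with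
    | some st => st
    | none => match sub_topics with
      | [] => ""
      | s :: _ => s

-- ===== PORT B =====
-- single pass: return on exact, record the first partial candidate in fp
def pvBLoop (text : String) : List String → Option String → Option String
  | [], fp => fp
  | st :: rest, fp =>
    let words := PySem.Str.split₀ (PySem.Str.lower st)
    let exact := words.filter (fun w => 2 < PySem.Str.len w)
    if !exact.isEmpty && exact.all (fun w => PySem.Str.isIn w text) then
      some st
    else
      pvBLoop text rest
        (if fp.isNone &&
            (words.filter (fun w => 3 < PySem.Str.len w)).any (fun w => PySem.Str.isIn w text)
         then some st else fp)

def match_sub_topic_py_alt (text : String) (sub_topics : List String) : String :=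
  match pvBLoop text sub_topics none with
  | some st => st
  | none => match sub_topics with
    | [] => ""
    | s :: _ => s

-- ===== PRECONDITION & SPEC =====
def Spec_match_sub_topic_py (text : String) (sub_topics : List String) (out : String) : Prop := out = match_sub_topic_py_alt text sub_topics
instance (text : String) (sub_topics : List String) (out : String) : Decidable (Spec_match_sub_topic_py text sub_topics out) := by unfold Spec_match_sub_topic_py; infer_instance

-- ===== CLAIM (what is proved, stated in full; the proofs are below) =====
def Claim_equal_match_sub_topic_py : Prop := ∀ (text : String) (sub_topics : List String), Dom_match_sub_topic_py text sub_topics → Spec_match_sub_topic_py text sub_topics (match_sub_topic_py text sub_topics)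

-- ===== LEMMAS AND PROOFS =====

-- the single pass equals: exact-loop result, else the accumulator, else the partial-loop result
theorem pvBLoop_cons (text st : String) (rest : List String) (fp : Option String) :
    pvBLoop text (st :: rest) fp =
      if pvAExactCond text st then some st
      else pvBLoop text rest (if fp.isNone && pvAPartialCond text st then some st else fp) := rfl

theorem pvBLoop_eq (text : String) (sts : List String) (fp : Option String) :
    pvBLoop text sts fp =
      match pvAExactLoop text sts with
      | some s => some s
      | none => match fp with
        | some f => some f
        | none => pvAPartialLoop text sts := by
  induction sts generalizing fp with
  | nil => cases fp <;> rfl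
  | cons st rest ih =>
    rw [pvBLoop_cons, pvAExactLoop, pvAPartialLoop]
    cases hex : pvAExactCond text st with
    | true => rfl
    | false =>
      simp only [Bool.false_eq_true, if_false, ih]
      cases fp with
      | some f => simp
      | none =>
        cases hp : pvAPartialCond text st with
        | true => simp
        | false => simp

-- ===== VERDICT (by name: the statement is the Claim_ definition above) =====
theorem match_sub_topic_py_spec : Claim_equal_match_sub_topic_py := by
  intro text sub_topics _
  unfold Spec_match_sub_topic_py match_sub_topic_py match_sub_topic_py_alt
  rw [pvBLoop_eq]
  cases pvAExactLoop text sub_topics <;> cases pvAPartialLoop text sub_topics <;>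
    cases sub_topics <;> rfl
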